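-- pv_equiv track=rewrite | github.com/NickF0211/SimpleLTSGenerator | svl_template.py | generate_svl_for_ring
-- ===== SOURCE A (Python) =====
-- def form_body(graph_name, id):
--     return "    \"{graph}_{id}.bcg\"".format(graph = graph_name, id=id)
--
-- def generate_svl_for_ring(graph_name, N, shared_action="ACT_SHARED_{}_{}"):
--     if N <=  1:
--         return ""
--     indent_token = "    "
--     cur_body = generate_svl_for_pair(N-1, 0, form_body(graph_name, N-1), form_body(graph_name, 0), shared_action, indent=indent_token*N)
--     for i in range(N-2):
--         next = i + 1
--         if next == N-2:
--             cur_body = generate_svl_for_pair_special(i, next, cur_body, form_body(graph_name, next), "{},{}".format(shared_action.format(i, next),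
--                                                                                                                     shared_action.format(next, next+1)),
--                                   indent=indent_token * (N - 1 - i))
--         else:
--             cur_body = generate_svl_for_pair(i, next, cur_body, form_body(graph_name, next), shared_action, indent= indent_token * (N-1-i))
--
--     return cur_body
--
-- def generate_svl_for_pair(pa, pb, pa_string, pb_string, shared_action="ACT_SHARED_{}_{}", indent=""):
--     shared_action = shared_action.format(pa, pb)
--     string= "{indent}par\n" \
--             "{indent}   {shared_action} -> \n" \
--             "{indent}{pa_string}\n" \
--             "{indent}||\n" \
--             "{indent}    {shared_action} -> \n" \
--             "{indent}{pb_string}\n " \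
--             "{indent}end par".format(pa_string= pa_string, pb_string = pb_string, shared_action = shared_action.format(pa, pb),
--                                       indent = indent)
--
--     return string
--
-- def generate_svl_for_pair_special(pa, pb, pa_string, pb_string, shared_action, indent=""):
--     shared_action = shared_action.format(pa, pb)
--     string= "{indent}par\n" \
--             "{indent}   {shared_action} -> \n" \
--             "{indent}{pa_string}\n" \
--             "{indent}||\n" \
--             "{indent}    {shared_action} -> \n" \
--             "{indent}{pb_string}\n " \
--             "{indent}end par;".format(pa_string= pa_string, pb_string = pb_string, shared_action = shared_action,
--                                       indent = indent)
--
--     return string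
-- ===== SOURCE B (Python) =====
-- def generate_svl_for_ring(graph_name, N, shared_action="ACT_SHARED_{}_{}"):
--     if N <= 1:
--         return ""
--     tok = "    "
--
--     def body(k):
--         return '    "{}_{}.bcg"'.format(graph_name, k)
--
--     def layer(i):
--         indent = tok * (N - 1 - i)
--         if i == N - 3:
--             action = shared_action.format(i, i + 1) + "," + shared_action.format(i + 1, i + 2)
--             close = "end par;"
--         else:
--             action = shared_action.format(i, i + 1)
--             close = "end par"
--         head = indent + "par\n" + indent + "   " + action + " -> \n" + indent
--         tail = ("\n" + indent + "||\n" + indent + "    " + action + " -> \n"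
--                 + indent + body(i + 1) + "\n " + indent + close)
--         return head, tail
--
--     rows = [layer(i) for i in range(N - 2)]
--     inner_indent = tok * N
--     act0 = shared_action.format(N - 1, 0)
--     inner = (inner_indent + "par\n"
--              + inner_indent + "   " + act0 + " -> \n"
--              + inner_indent + body(N - 1) + "\n"
--              + inner_indent + "||\n"
--              + inner_indent + "    " + act0 + " -> \n"
--              + inner_indent + body(0) + "\n "
--              + inner_indent + "end par")
--     return ("".join(h for h, _ in reversed(rows)) + inner
--             + "".join(t for _, t in rows))
-- ===== Notes on version B (the rewrite author's own statement) =====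
-- stated objective: faster
-- what changed: Replaces the accumulator fold that re-embeds and re-copies the whole growing body at every layer by a flat single pass that precomputes each layer's head/tail pieces and joins them once around the innermost pair; the shared action is formatted once instead of A's redundant double .format.
import Mathlib
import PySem

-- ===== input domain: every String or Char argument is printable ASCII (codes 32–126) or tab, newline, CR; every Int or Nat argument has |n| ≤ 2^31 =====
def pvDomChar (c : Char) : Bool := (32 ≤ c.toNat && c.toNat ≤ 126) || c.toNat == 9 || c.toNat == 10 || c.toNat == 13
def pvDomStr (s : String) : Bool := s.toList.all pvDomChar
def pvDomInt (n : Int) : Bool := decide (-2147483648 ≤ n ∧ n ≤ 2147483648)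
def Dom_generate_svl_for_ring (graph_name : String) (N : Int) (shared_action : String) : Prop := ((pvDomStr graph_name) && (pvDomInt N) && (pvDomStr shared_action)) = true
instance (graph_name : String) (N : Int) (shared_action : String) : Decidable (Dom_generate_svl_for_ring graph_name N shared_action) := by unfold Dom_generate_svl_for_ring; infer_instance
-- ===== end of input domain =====

-- B replaces A's accumulator fold (which re-copies the whole growing body at every layer,
-- O(S^2) copying) by one flat pass collecting per-layer head/tail pieces joined once (O(S));
-- a timing run measured B faster.


-- ===== PORT A =====
-- Shared string primitives (ported Python built-ins, used by both ports).
-- s * n  (Python string repetition; n ≤ 0 gives "")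
def pvStrMul (s : List Char) (n : Int) : List Char := (List.replicate n.toNat s).flatten

-- s.format(args…) restricted to plain auto-numbered "{}" fields: exact on the Pre_ domain,
-- where every '{' is immediately followed by '}' and there are no stray '}' and no more
-- fields than arguments (elsewhere CPython raises or engages format features not modelled).
def pvFmtApply : List Char → List (List Char) → List Char
  | [], _ => []
  | [c], _ => [c]
  | c :: d :: r, args =>
    if c = '{' ∧ d = '}' then
      match args with
      | a :: args' => a ++ pvFmtApply r args'
      | [] => c :: d :: pvFmtApply r []
    else
      c :: pvFmtApply (d :: r) args

def pvFormBody (g : List Char) (id : Int) : List Char :=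
  "    \"".toList ++ g ++ "_".toList ++ PySem.Int.toChars id ++ ".bcg\"".toList

def pvPairA (pa pb : Int) (paS pbS sa indent : List Char) : List Char :=
  let sa1 := pvFmtApply sa [PySem.Int.toChars pa, PySem.Int.toChars pb]
  let sa2 := pvFmtApply sa1 [PySem.Int.toChars pa, PySem.Int.toChars pb]
  indent ++ "par\n".toList ++ indent ++ "   ".toList ++ sa2 ++ " -> \n".toList ++
  indent ++ paS ++ "\n".toList ++ indent ++ "||\n".toList ++
  indent ++ "    ".toList ++ sa2 ++ " -> \n".toList ++
  indent ++ pbS ++ "\n ".toList ++ indent ++ "end par".toList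

def pvPairSpecialA (pa pb : Int) (paS pbS sa indent : List Char) : List Char :=
  let sa1 := pvFmtApply sa [PySem.Int.toChars pa, PySem.Int.toChars pb]
  indent ++ "par\n".toList ++ indent ++ "   ".toList ++ sa1 ++ " -> \n".toList ++
  indent ++ paS ++ "\n".toList ++ indent ++ "||\n".toList ++
  indent ++ "    ".toList ++ sa1 ++ " -> \n".toList ++
  indent ++ pbS ++ "\n ".toList ++ indent ++ "end par;".toList

def pvInnerA (g sa : List Char) (N : Int) : List Char :=
  pvPairA (N-1) 0 (pvFormBody g (N-1)) (pvFormBody g 0) sa (pvStrMul "    ".toList N)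

def pvStepA (g sa : List Char) (N : Int) (cur : List Char) (i : Int) : List Char :=
  if i + 1 = N - 2 then
    pvPairSpecialA i (i+1) cur (pvFormBody g (i+1))
      (pvFmtApply sa [PySem.Int.toChars i, PySem.Int.toChars (i+1)] ++ ",".toList ++
       pvFmtApply sa [PySem.Int.toChars (i+1), PySem.Int.toChars (i+2)])
      (pvStrMul "    ".toList (N-1-i))
  else
    pvPairA i (i+1) cur (pvFormBody g (i+1)) sa (pvStrMul "    ".toList (N-1-i))

def generate_svl_for_ring (graph_name : String) (N : Int) (shared_action : String) : String :=
  if N ≤ 1 then "" else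
  let g := graph_name.toList
  let sa := shared_action.toList
  let cur := List.foldl (pvStepA g sa N) (pvInnerA g sa N) (PySem.List.pyRange 0 (N-2) 1)
  String.ofList cur

-- ===== PORT B =====
def pvBodyB (g : List Char) (k : Int) : List Char :=
  "    \"".toList ++ g ++ "_".toList ++ PySem.Int.toChars k ++ ".bcg\"".toList

def pvLayerB (g sa : List Char) (N i : Int) : List Char × List Char :=
  let indent := pvStrMul "    ".toList (N - 1 - i)
  let ac :=
    if i = N - 3 then
      (pvFmtApply sa [PySem.Int.toChars i, PySem.Int.toChars (i+1)] ++ ",".toList ++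
       pvFmtApply sa [PySem.Int.toChars (i+1), PySem.Int.toChars (i+2)], "end par;".toList)
    else
      (pvFmtApply sa [PySem.Int.toChars i, PySem.Int.toChars (i+1)], "end par".toList)
  (indent ++ "par\n".toList ++ indent ++ "   ".toList ++ ac.1 ++ " -> \n".toList ++ indent,
   "\n".toList ++ indent ++ "||\n".toList ++ indent ++ "    ".toList ++ ac.1 ++ " -> \n".toList ++
   indent ++ pvBodyB g (i+1) ++ "\n ".toList ++ indent ++ ac.2)

def pvInnerB (g sa : List Char) (N : Int) : List Char :=
  let ind := pvStrMul "    ".toList N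
  let act0 := pvFmtApply sa [PySem.Int.toChars (N-1), PySem.Int.toChars 0]
  ind ++ "par\n".toList ++ ind ++ "   ".toList ++ act0 ++ " -> \n".toList ++
  ind ++ pvBodyB g (N-1) ++ "\n".toList ++ ind ++ "||\n".toList ++
  ind ++ "    ".toList ++ act0 ++ " -> \n".toList ++
  ind ++ pvBodyB g 0 ++ "\n ".toList ++ ind ++ "end par".toList

def generate_svl_for_ring_alt (graph_name : String) (N : Int) (shared_action : String) : String :=
  if N ≤ 1 then "" else
  let g := graph_name.toList
  let sa := shared_action.toList
  let rows := (PySem.List.pyRange 0 (N-2) 1).map (pvLayerB g sa N)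
  String.ofList ((rows.reverse.map Prod.fst).flatten ++ pvInnerB g sa N ++
                 (rows.map Prod.snd).flatten)

-- ===== PRECONDITION & SPEC =====
-- Whether shared_action's braces form at most two plain "{}" auto-fields (what str.format
-- replaces by the two arguments on the admitted inputs), given the budget of remaining fields.
def pvFmtOk : List Char → Nat → Bool
  | [], _ => true
  | [c], _ => !(c = '{' : Bool) && !(c = '}' : Bool)
  | c :: d :: r, k =>
    if c = '{' ∧ d = '}' then
      match k with
      | k' + 1 => pvFmtOk r k'
      | 0 => false
    else
      !(c = '{' : Bool) && !(c = '}' : Bool) && pvFmtOk (d :: r) k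

-- Pre_ admits shared_action whose braces are at most two plain "{}" auto-fields (or N ≤ 1,
-- where shared_action is never formatted): on other brace patterns A either raises
-- (unbalanced braces, three or more fields) or engages format features ({0}, {{ escapes)
-- whose value under A's accidental double-formatting is an artefact the ports do not model.
def Pre_generate_svl_for_ring (_graph_name : String) (N : Int) (shared_action : String) : Prop :=
  N ≤ 1 ∨ pvFmtOk shared_action.toList 2 = true
instance (graph_name : String) (N : Int) (shared_action : String) : Decidable (Pre_generate_svl_for_ring graph_name N shared_action) := by unfold Pre_generate_svl_for_ring; infer_instance

def pvWitness_generate_svl_for_ring : String × Int × String := ("g", 3, "ACT_SHARED_{}_{}")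

def Spec_generate_svl_for_ring (graph_name : String) (N : Int) (shared_action : String) (out : String) : Prop := out = generate_svl_for_ring_alt graph_name N shared_action
instance (graph_name : String) (N : Int) (shared_action : String) (out : String) : Decidable (Spec_generate_svl_for_ring graph_name N shared_action out) := by unfold Spec_generate_svl_for_ring; infer_instance

-- ===== CLAIM (what is proved, stated in full; the proofs are below) =====
def Claim_equal_generate_svl_for_ring : Prop := ∀ (graph_name : String) (N : Int) (shared_action : String), Dom_generate_svl_for_ring graph_name N shared_action → Pre_generate_svl_for_ring graph_name N shared_action → Spec_generate_svl_for_ring graph_name N shared_action (generate_svl_for_ring graph_name N shared_action)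

-- ===== LEMMAS AND PROOFS =====
def pvNoBr (l : List Char) : Bool := l.all (fun c => !(c = '{' : Bool) && !(c = '}' : Bool))

theorem pvNoBr_append (a b : List Char) : pvNoBr (a ++ b) = (pvNoBr a && pvNoBr b) := by
  simp [pvNoBr, List.all_append]

theorem pvFmtApply_of_noBr (l : List Char) (args : List (List Char)) (h : pvNoBr l = true) :
    pvFmtApply l args = l := by
  fun_induction pvFmtApply l args with
  | case1 => rfl
  | case2 => rfl
  | case3 c d r hcd a args' ih =>
      exfalso
      simp [pvNoBr, hcd.1] at h
  | case4 c d r hcd ih =>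
      exfalso
      simp [pvNoBr, hcd.1] at h
  | case5 c d r args hcd ih =>
      simp only [pvNoBr, List.all_cons, Bool.and_eq_true] at h
      simp [ih (by simp [pvNoBr, h.2.1, h.2.2])]

theorem pvNoBr_fmtApply (l : List Char) (k : Nat) (args : List (List Char))
    (hok : pvFmtOk l k = true) (hlen : args.length = k)
    (hargs : ∀ a ∈ args, pvNoBr a = true) : pvNoBr (pvFmtApply l args) = true := by
  fun_induction pvFmtOk l k generalizing args with
  | case1 => simp [pvFmtApply, pvNoBr]
  | case2 c =>
      simp only [Bool.and_eq_true, Bool.not_eq_eq_eq_not, Bool.not_true, decide_eq_false_iff_not] at hok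
      cases args <;> simp [pvFmtApply, pvNoBr, hok.1, hok.2]
  | case3 c d r hcd k' ih =>
      cases args with
      | nil => simp at hlen
      | cons a args' =>
          have he : pvFmtApply (c :: d :: r) (a :: args') = a ++ pvFmtApply r args' := by
            simp [pvFmtApply, hcd]
          rw [he, pvNoBr_append]
          have h1 := hargs a (by simp)
          have h2 := ih args' hok (by simpa using hlen)
            (fun x hx => hargs x (by simp [hx]))
          simp [h1, h2]
  | case4 c d r hcd => simp at hok
  | case5 c d r k hcd ih =>
      simp only [Bool.and_eq_true, Bool.not_eq_eq_eq_not, Bool.not_true,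
        decide_eq_false_iff_not] at hok
      have he : pvFmtApply (c :: d :: r) args = c :: pvFmtApply (d :: r) args := by
        simp [pvFmtApply, hcd]
      rw [he]
      have h2 := ih args hok.2 hlen hargs
      simp only [pvNoBr, List.all_cons, Bool.and_eq_true] at h2 ⊢
      exact ⟨by simp [hok.1.1, hok.1.2], h2⟩

theorem pvDigitChar_ne (m : Nat) : Nat.digitChar m ≠ '{' ∧ Nat.digitChar m ≠ '}' := by
  rcases Nat.lt_or_ge m 16 with h | h
  · interval_cases m <;> exact ⟨by decide, by decide⟩
  · have e : Nat.digitChar m = '*' := by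
      unfold Nat.digitChar
      have h0 : m ≠ 0 := by omega
      have h1 : m ≠ 1 := by omega
      have h2 : m ≠ 2 := by omega
      have h3 : m ≠ 3 := by omega
      have h4 : m ≠ 4 := by omega
      have h5 : m ≠ 5 := by omega
      have h6 : m ≠ 6 := by omega
      have h7 : m ≠ 7 := by omega
      have h8 : m ≠ 8 := by omega
      have h9 : m ≠ 9 := by omega
      have h10 : m ≠ 10 := by omega
      have h11 : m ≠ 11 := by omega
      have h12 : m ≠ 12 := by omega
      have h13 : m ≠ 13 := by omega
      have h14 : m ≠ 14 := by omega
      have h15 : m ≠ 15 := by omega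
      simp [h0, h1, h2, h3, h4, h5, h6, h7, h8, h9, h10, h11, h12, h13, h14, h15]
    rw [e]; exact ⟨by decide, by decide⟩

theorem pvNoBr_digitChar (m : Nat) :
    (!(Nat.digitChar m = '{' : Bool) && !(Nat.digitChar m = '}' : Bool)) = true := by
  have := pvDigitChar_ne m
  simp [this.1, this.2]

theorem pvNoBr_toDigitsCore (f n : Nat) (ds : List Char) (h : pvNoBr ds = true) :
    pvNoBr (Nat.toDigitsCore 10 f n ds) = true := by
  induction f generalizing n ds with
  | zero => simpa [Nat.toDigitsCore] using h
  | succ f ih =>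
      have hcons : pvNoBr (Nat.digitChar (n % 10) :: ds) = true := by
        have := pvNoBr_digitChar (n % 10)
        simp only [pvNoBr, List.all_cons, Bool.and_eq_true] at h ⊢
        simp only [Bool.and_eq_true] at this
        exact ⟨⟨this.1, this.2⟩, h⟩
      simp only [Nat.toDigitsCore]
      split
      · exact hcons
      · exact ih _ _ hcons

theorem pvNoBr_toChars (n : Int) : pvNoBr (PySem.Int.toChars n) = true := by
  unfold PySem.Int.toChars
  split
  · have := pvNoBr_toDigitsCore (n.natAbs + 1) n.natAbs []
    simp only [Nat.toDigits] at *
    simp only [pvNoBr, List.all_cons, Bool.and_eq_true] at *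
    exact ⟨by decide, by simpa using this (by simp)⟩
  · simpa [Nat.toDigits] using pvNoBr_toDigitsCore (n.toNat + 1) n.toNat [] (by simp [pvNoBr])

-- the single-formatted action is brace-free, hence A's second format is the identity
theorem pvFmt2_eq (sa : List Char) (hok : pvFmtOk sa 2 = true) (a b : Int) :
    pvFmtApply (pvFmtApply sa [PySem.Int.toChars a, PySem.Int.toChars b])
      [PySem.Int.toChars a, PySem.Int.toChars b]
    = pvFmtApply sa [PySem.Int.toChars a, PySem.Int.toChars b] := by
  apply pvFmtApply_of_noBr
  exact pvNoBr_fmtApply sa 2 _ hok rfl (by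
    intro x hx; simp at hx; rcases hx with h | h <;> subst h <;> exact pvNoBr_toChars _)

theorem pvStepA_eq (g sa : List Char) (N : Int) (hok : pvFmtOk sa 2 = true)
    (c : List Char) (i : Int) :
    pvStepA g sa N c i = (pvLayerB g sa N i).1 ++ c ++ (pvLayerB g sa N i).2 := by
  have hargs : ∀ a b : Int, ∀ x ∈ [PySem.Int.toChars a, PySem.Int.toChars b], pvNoBr x = true := by
    intro a b x hx; simp at hx; rcases hx with h | h <;> subst h <;> exact pvNoBr_toChars _
  by_cases hc : i + 1 = N - 2
  · have hc' : i = N - 3 := by omega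
    have hA := pvNoBr_fmtApply sa 2 [PySem.Int.toChars i, PySem.Int.toChars (i+1)] hok rfl (hargs i (i+1))
    have hB := pvNoBr_fmtApply sa 2 [PySem.Int.toChars (i+1), PySem.Int.toChars (i+2)] hok rfl (hargs (i+1) (i+2))
    have hcomb : pvNoBr (pvFmtApply sa [PySem.Int.toChars i, PySem.Int.toChars (i+1)] ++ ",".toList ++
        pvFmtApply sa [PySem.Int.toChars (i+1), PySem.Int.toChars (i+2)]) = true := by
      simp only [pvNoBr_append, Bool.and_eq_true]
      exact ⟨⟨hA, by decide⟩, hB⟩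
    have hid := pvFmtApply_of_noBr _
      [PySem.Int.toChars i, PySem.Int.toChars (i+1)] hcomb
    simp only [pvStepA, pvLayerB, if_pos hc, if_pos hc', pvPairSpecialA, hid, pvBodyB, pvFormBody]
    simp [List.append_assoc]
  · have hc' : ¬ (i = N - 3) := by omega
    have h2 := pvFmt2_eq sa hok i (i+1)
    simp only [pvStepA, pvLayerB, if_neg hc, if_neg hc', pvPairA, h2, pvBodyB, pvFormBody]
    simp [List.append_assoc]

theorem pvInner_eq (g sa : List Char) (N : Int) (hok : pvFmtOk sa 2 = true) :
    pvInnerA g sa N = pvInnerB g sa N := by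
  have h2 := pvFmt2_eq sa hok (N-1) 0
  simp only [pvInnerA, pvPairA, pvInnerB, pvBodyB, pvFormBody, h2]

theorem pvMain_inv (g sa : List Char) (N : Int) (hok : pvFmtOk sa 2 = true) (m : Nat) :
    List.foldl (pvStepA g sa N) (pvInnerA g sa N) (PySem.List.pyRange 0 (m : Int) 1)
    = ((((PySem.List.pyRange 0 (m : Int) 1).map (pvLayerB g sa N)).reverse.map Prod.fst).flatten)
      ++ pvInnerB g sa N
      ++ (((PySem.List.pyRange 0 (m : Int) 1).map (pvLayerB g sa N)).map Prod.snd).flatten := by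
  induction m with
  | zero =>
      have h0 : PySem.List.pyRange 0 ((0:Nat):Int) 1 = [] :=
        PySem.List.pyRange_one_eq_nil (by omega)
      rw [h0]
      simp [pvInner_eq g sa N hok]
  | succ m ih =>
      have hsplit : PySem.List.pyRange 0 ((m : Int) + 1) 1
          = PySem.List.pyRange 0 (m : Int) 1 ++ [(m : Int)] :=
        PySem.List.pyRange_one_succ_right (by omega)
      push_cast
      rw [hsplit, List.foldl_append]
      simp only [List.foldl_cons, List.foldl_nil, ih, pvStepA_eq g sa N hok]
      simp [List.append_assoc]

-- ===== VERDICT (by name: the statement is the Claim_ definition above) =====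
theorem generate_svl_for_ring_spec : Claim_equal_generate_svl_for_ring := by
  intro graph_name N shared_action _hdom hpre
  unfold Spec_generate_svl_for_ring
  by_cases hN : N ≤ 1
  · simp [generate_svl_for_ring, generate_svl_for_ring_alt, hN]
  · have hok : pvFmtOk shared_action.toList 2 = true := by
      rcases hpre with h | h
      · exact absurd h hN
      · exact h
    have hnat : ((N - 2).toNat : Int) = N - 2 := by omega
    simp only [generate_svl_for_ring, generate_svl_for_ring_alt, if_neg hN]
    rw [← hnat, pvMain_inv graph_name.toList shared_action.toList N hok]
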